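-- pv_equiv track=rewrite | github.com/ToaruPen/coq-japanese_stable | scripts/scan_activated_ability_names.py | _consume_char_literal_end
-- ===== SOURCE A (Python) =====
-- def _consume_char_literal_end(text: str, start: int) -> int:
--     index = start + 1
--     while index < len(text):
--         if text[index] == "\\":
--             index += 2
--             continue
--         if text[index] == "'":
--             return index + 1
--         index += 1
--     return len(text)
-- ===== SOURCE B (Python) =====
-- def _consume_char_literal_end(text: str, start: int) -> int:
--     n = len(text)
--     i = max(start + 1, 0)
--     while i < n:
--         q = text.find("'", i)
--         b = text.find("\\", i)
--         if b != -1 and (q == -1 or b < q):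
--             i = b + 2
--         elif q != -1:
--             return q + 1
--         else:
--             return n
--     return n
-- ===== Notes on version B (the rewrite author's own statement) =====
-- stated objective: faster
-- what changed: Replaces A's per-character Python while-loop with repeated str.find jumps: find the next quote and the next backslash, skip past escape pairs, and return just after the first unescaped quote (C-level scanning instead of a Python character loop).
-- outside the precondition, e.g. on _consume_char_literal_end("a'b", -3): A returns -1, B returns 2; on _consume_char_literal_end('ab', -3): A returns 2, B returns 2
import Mathlib
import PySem

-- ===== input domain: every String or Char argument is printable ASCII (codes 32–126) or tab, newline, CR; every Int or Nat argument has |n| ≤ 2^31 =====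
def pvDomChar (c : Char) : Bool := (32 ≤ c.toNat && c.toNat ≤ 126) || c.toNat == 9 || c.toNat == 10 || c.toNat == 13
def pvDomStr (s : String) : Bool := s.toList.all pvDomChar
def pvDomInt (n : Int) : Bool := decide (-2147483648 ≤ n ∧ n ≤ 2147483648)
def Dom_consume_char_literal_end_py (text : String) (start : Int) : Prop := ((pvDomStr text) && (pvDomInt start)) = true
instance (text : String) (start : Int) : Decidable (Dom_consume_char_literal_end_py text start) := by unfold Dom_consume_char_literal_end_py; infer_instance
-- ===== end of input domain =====

-- B replaces A's per-character scan with repeated `str.find` jumps to the next quote/backslash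
-- (C-level scanning in Python); the return values are proved equal on all of Pre_ below.

-- ===== PORT A =====
-- A's while-loop, as structural recursion on a fuel counter (the fuel only makes the
-- recursion total; the caller always supplies enough, see the lemmas below).
-- Python raises IndexError when text[index] is out of range: that is the `none` branch,
-- excluded by Pre_ (the 0 returned there is never reached under Pre_).
def pvALoop (cs : List Char) : Nat → Int → Int
  | 0, _ => 0
  | fuel+1, index =>
    if index < (cs.length : Int) then
      match PySem.List.pyGet? cs index with
      | some c =>
        if c = '\\' then pvALoop cs fuel (index + 2)
        else if c = '\'' then index + 1
        else pvALoop cs fuel (index + 1)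
      | none => 0
    else (cs.length : Int)

def consume_char_literal_end_py (text : String) (start : Int) : Int :=
  pvALoop text.toList (((text.toList.length : Int) - start).toNat + 1) (start + 1)

-- ===== PORT B =====
-- Source B's while-loop; `text.find(sub, i)` is PySem.Chars.findFrom on text.toList (exact:
-- PySem.Str.findFrom is definitionally Chars.findFrom of .toList).  i = max(start+1, 0) ≥ 0
-- stays nonnegative, so it is carried as a Nat; fuel as in port A.
def pvBLoop (cs : List Char) : Nat → Nat → Int
  | 0, _ => 0
  | fuel+1, i =>
    if i < cs.length then
      let q := PySem.Chars.findFrom cs ['\''] (i : Int)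
      let b := PySem.Chars.findFrom cs ['\\'] (i : Int)
      if b ≠ -1 ∧ (q = -1 ∨ b < q) then pvBLoop cs fuel (b + 2).toNat
      else if q ≠ -1 then q + 1
      else (cs.length : Int)
    else (cs.length : Int)

def consume_char_literal_end_py_alt (text : String) (start : Int) : Int :=
  pvBLoop text.toList (text.toList.length + 1) (max (start + 1) 0).toNat

-- ===== PRECONDITION & SPEC =====
-- Pre_ restricts to the function's natural domain (start is the index of the opening quote,
-- so the scan begins at start + 1 ≥ 0): on the excluded start < -1 A either raises IndexError
-- (when start + 1 < -len(text)) or reads the string through Python negative-index wraparound,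
-- an accidental out-of-domain behaviour neither value specifies (A can return -1 as an
-- "end index", e.g. on ("a'b", -3); B scans from 0 there).
def Pre_consume_char_literal_end_py (text : String) (start : Int) : Prop :=
  0 ≤ start + 1

instance (text : String) (start : Int) : Decidable (Pre_consume_char_literal_end_py text start) := by
  unfold Pre_consume_char_literal_end_py; infer_instance

def pvWitness_consume_char_literal_end_py : String × Int := ("x'", 0)

def Spec_consume_char_literal_end_py (text : String) (start : Int) (out : Int) : Prop :=
  out = consume_char_literal_end_py_alt text start

instance (text : String) (start : Int) (out : Int) : Decidable (Spec_consume_char_literal_end_py text start out) := by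
  unfold Spec_consume_char_literal_end_py; infer_instance

-- ===== CLAIM (what is proved, stated in full; the proofs are below) =====
def Claim_equal_consume_char_literal_end_py : Prop := ∀ (text : String) (start : Int), Dom_consume_char_literal_end_py text start → Pre_consume_char_literal_end_py text start → Spec_consume_char_literal_end_py text start (consume_char_literal_end_py text start)

-- ===== LEMMAS AND PROOFS =====

-- pvALoop does not depend on the fuel, as long as the fuel is sufficient.
lemma pv_aloop_fuel (cs : List Char) : ∀ (fA : Nat) (fB : Nat) (idx : Int),
    ((cs.length : Int) - idx).toNat < fA → ((cs.length : Int) - idx).toNat < fB →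
    pvALoop cs fA idx = pvALoop cs fB idx := by
  intro fA
  induction fA with
  | zero => intro fB idx hA hB; omega
  | succ fA ih =>
    intro fB idx hA hB
    obtain ⟨fB', rfl⟩ : ∃ k, fB = k + 1 := ⟨fB - 1, by omega⟩
    by_cases hlt : idx < (cs.length : Int)
    · simp only [pvALoop, if_pos hlt]
      cases hget : PySem.List.pyGet? cs idx with
      | none => rfl
      | some c =>
        by_cases h1 : c = '\\'
        · simp only [h1]
          exact ih fB' (idx + 2) (by omega) (by omega)
        · by_cases h2 : c = '\''
          · simp [h2]
          · simp only [if_neg h1, if_neg h2]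
            exact ih fB' (idx + 1) (by omega) (by omega)
    · simp only [pvALoop, if_neg hlt]

lemma pv_sq_of_prefix {cs : List Char} {c : Char} {j : Nat} (h : [c] <+: cs.drop j) :
    ∃ hj : j < cs.length, cs[j] = c := by
  obtain ⟨t, ht⟩ := h
  have h2 : cs[j]? = some c := by
    rw [← List.head?_drop, ← ht]; rfl
  rw [List.getElem?_eq_some_iff] at h2
  exact h2

lemma pv_prefix_of_sq {cs : List Char} {c : Char} {j : Nat} (hj : j < cs.length)
    (hv : cs[j] = c) : [c] <+: cs.drop j := by
  refine ⟨cs.drop (j + 1), ?_⟩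
  rw [List.drop_eq_getElem_cons hj, hv]
  rfl

lemma pv_mem_drop_of_le {cs : List Char} {i k : Nat} (hik : i ≤ k) (hk : k < cs.length) :
    cs[k] ∈ cs.drop i := by
  have hlen : k - i < (cs.drop i).length := by simp; omega
  have : (cs.drop i)[k - i] = cs[k] := by
    rw [List.getElem_drop]
    congr 1
    omega
  rw [← this]
  exact List.getElem_mem hlen

-- A's loop returns len(text) when there is no quote at or after position i.
lemma pv_aloop_noquote (cs : List Char) : ∀ (fuel : Nat) (i : Nat),
    cs.length - i < fuel →
    (∀ k (hk : k < cs.length), i ≤ k → cs[k] ≠ '\'') →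
    pvALoop cs fuel (i : Int) = (cs.length : Int) := by
  intro fuel
  induction fuel with
  | zero => intro i h _; omega
  | succ fuel ih =>
    intro i hf hq
    by_cases hlt : i < cs.length
    · have hlt' : (i : Int) < (cs.length : Int) := by exact_mod_cast hlt
      have hget : PySem.List.pyGet? cs (i : Int) = some cs[i] := by
        rw [PySem.List.pyGet?_natCast]
        exact List.getElem?_eq_some_iff.mpr ⟨hlt, rfl⟩
      simp only [pvALoop, if_pos hlt', hget]
      by_cases h1 : cs[i] = '\\'
      · simp only [h1]
        have : ((i : Int) + 2) = ((i + 2 : Nat) : Int) := by push_cast; ring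
        rw [this]
        exact ih (i + 2) (by omega) (fun k hk h2 => hq k hk (by omega))
      · have h2 : cs[i] ≠ '\'' := hq i hlt le_rfl
        simp only [if_neg h1, if_neg h2]
        have : ((i : Int) + 1) = ((i + 1 : Nat) : Int) := by push_cast; ring
        rw [this]
        exact ih (i + 1) (by omega) (fun k hk h2 => hq k hk (by omega))
    · have hlt' : ¬ ((i : Int) < (cs.length : Int)) := by exact_mod_cast hlt
      simp only [pvALoop, if_neg hlt']

-- A's loop skips a block of ordinary characters (no quote, no backslash) one at a time.
lemma pv_aloop_skip (cs : List Char) : ∀ (fA : Nat) (i : Nat), ∀ (fB : Nat) (j : Nat),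
    i ≤ j → j ≤ cs.length → cs.length - i < fA → cs.length - j < fB →
    (∀ k (hk : k < cs.length), i ≤ k → k < j → cs[k] ≠ '\\' ∧ cs[k] ≠ '\'') →
    pvALoop cs fA (i : Int) = pvALoop cs fB (j : Int) := by
  intro fA
  induction fA with
  | zero => intro i fB j h1 h2 h3 _ _; omega
  | succ fA ih =>
    intro i fB j hij hjlen hfA hfB hord
    rcases Nat.eq_or_lt_of_le hij with rfl | hlt
    · exact pv_aloop_fuel cs (fA + 1) fB (i : Int) (by omega) (by omega)
    · have hilen : i < cs.length := by omega
      have hilen' : (i : Int) < (cs.length : Int) := by exact_mod_cast hilen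
      have hget : PySem.List.pyGet? cs (i : Int) = some cs[i] := by
        rw [PySem.List.pyGet?_natCast]
        exact List.getElem?_eq_some_iff.mpr ⟨hilen, rfl⟩
      obtain ⟨hb, hq⟩ := hord i hilen le_rfl hlt
      simp only [pvALoop, if_pos hilen', hget, if_neg hb, if_neg hq]
      have : ((i : Int) + 1) = ((i + 1 : Nat) : Int) := by push_cast; ring
      rw [this]
      exact ih (i + 1) fB j (by omega) hjlen (by omega) hfB
        (fun k hk hk1 hk2 => hord k hk (by omega) hk2)

-- a character is in the tail cs.drop i at its own position
lemma pv_no_char_in_drop {cs : List Char} {c : Char} {i : Nat}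
    (h : ¬ ([c] <:+: cs.drop i)) : ∀ k (hk : k < cs.length), i ≤ k → cs[k] ≠ c := by
  intro k hk hik hc
  exact h ((List.singleton_infix_iff _ _).mpr (hc ▸ pv_mem_drop_of_le hik hk))

-- Main loop equivalence at nonnegative indices.
lemma pv_ab_eq (cs : List Char) : ∀ (N i fA fB : Nat),
    cs.length - i ≤ N → cs.length - i < fA → cs.length - i < fB →
    pvALoop cs fA (i : Int) = pvBLoop cs fB i := by
  intro N
  induction N with
  | zero =>
    intro i fA fB hm hA hB
    have hge : cs.length ≤ i := by omega
    have hge' : ¬ ((i : Int) < (cs.length : Int)) := by exact_mod_cast Nat.not_lt.mpr hge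
    obtain ⟨fA', rfl⟩ : ∃ k, fA = k + 1 := ⟨fA - 1, by omega⟩
    obtain ⟨fB', rfl⟩ : ∃ k, fB = k + 1 := ⟨fB - 1, by omega⟩
    simp only [pvALoop, pvBLoop, if_neg hge', if_neg (Nat.not_lt.mpr hge)]
  | succ N ih =>
    intro i fA fB hm hA hB
    by_cases hge : cs.length ≤ i
    · have hge' : ¬ ((i : Int) < (cs.length : Int)) := by exact_mod_cast Nat.not_lt.mpr hge
      obtain ⟨fA', rfl⟩ : ∃ k, fA = k + 1 := ⟨fA - 1, by omega⟩
      obtain ⟨fB', rfl⟩ : ∃ k, fB = k + 1 := ⟨fB - 1, by omega⟩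
      simp only [pvALoop, pvBLoop, if_neg hge', if_neg (Nat.not_lt.mpr hge)]
    · have hi : i < cs.length := by omega
      have hk : i ≤ cs.length := by omega
      obtain ⟨fB', rfl⟩ : ∃ k, fB = k + 1 := ⟨fB - 1, by omega⟩
      set q := PySem.Chars.findFrom cs ['\''] (i : Int) with hqdef
      set b := PySem.Chars.findFrom cs ['\\'] (i : Int) with hbdef
      have hBunfold : pvBLoop cs (fB' + 1) i =
          if b ≠ -1 ∧ (q = -1 ∨ b < q) then pvBLoop cs fB' (b + 2).toNat
          else if q ≠ -1 then q + 1 else (cs.length : Int) := by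
        simp only [pvBLoop, if_pos hi, hqdef, hbdef]
      rw [hBunfold]
      by_cases hcond : b ≠ -1 ∧ (q = -1 ∨ b < q)
      · -- first relevant character is a backslash at b
        obtain ⟨hib, hbpre, hbmin⟩ := PySem.Chars.findFrom_natCast_spec cs ['\\'] i hk hcond.1
        obtain ⟨hblen, hbchar⟩ := pv_sq_of_prefix hbpre
        have hbN : (b.toNat : Int) = b := by omega
        -- no quote and no backslash strictly before b.toNat (at or after i)
        have hord : ∀ m (hm : m < cs.length), i ≤ m → m < b.toNat →
            cs[m] ≠ '\\' ∧ cs[m] ≠ '\'' := by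
          intro m hm him hmb
          constructor
          · intro hc
            exact hbmin m him hmb (pv_prefix_of_sq hm hc)
          · rcases hcond.2 with hq1 | hq2
            · have := (PySem.Chars.findFrom_natCast_eq_neg_one_iff cs ['\''] i hk).mp hq1
              exact pv_no_char_in_drop this m hm him
            · have hqne : q ≠ -1 := by omega
              obtain ⟨hiq, hqpre, hqmin⟩ :=
                PySem.Chars.findFrom_natCast_spec cs ['\''] i hk hqne
              intro hc
              exact hqmin m him (by omega) (pv_prefix_of_sq hm hc)
        have hskip := pv_aloop_skip cs fA i (cs.length - b.toNat + 1) b.toNat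
          (by omega) (by omega) hA (by omega) hord
        rw [hskip]
        have hblt : (b.toNat : Int) < (cs.length : Int) := by exact_mod_cast hblen
        have hget : PySem.List.pyGet? cs (b.toNat : Int) = some cs[b.toNat] := by
          rw [PySem.List.pyGet?_natCast]
          exact List.getElem?_eq_some_iff.mpr ⟨hblen, rfl⟩
        simp only [pvALoop, if_pos hblt, hget]
        rw [if_pos hbchar, if_pos hcond]
        have hcast : ((b.toNat : Int) + 2) = ((b.toNat + 2 : Nat) : Int) := by push_cast; ring
        have htn : (b + 2).toNat = b.toNat + 2 := by omega
        rw [hcast, htn]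
        exact ih (b.toNat + 2) (cs.length - b.toNat) fB' (by omega) (by omega) (by omega)
      · rw [if_neg hcond]
        by_cases hq : q = -1
        · -- no quote at or after i at all: A returns len
          rw [if_neg (by simp [hq])]
          have := (PySem.Chars.findFrom_natCast_eq_neg_one_iff cs ['\''] i hk).mp hq
          exact pv_aloop_noquote cs fA i hA (pv_no_char_in_drop this)
        · -- first relevant character is the quote at q
          rw [if_pos hq]
          obtain ⟨hiq, hqpre, hqmin⟩ := PySem.Chars.findFrom_natCast_spec cs ['\''] i hk hq
          obtain ⟨hqlen, hqchar⟩ := pv_sq_of_prefix hqpre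
          have hqN : (q.toNat : Int) = q := by omega
          have hord : ∀ m (hm : m < cs.length), i ≤ m → m < q.toNat →
              cs[m] ≠ '\\' ∧ cs[m] ≠ '\'' := by
            intro m hm him hmq
            refine ⟨?_, fun hc => hqmin m him hmq (pv_prefix_of_sq hm hc)⟩
            by_cases hb : b = -1
            · have := (PySem.Chars.findFrom_natCast_eq_neg_one_iff cs ['\\'] i hk).mp hb
              exact pv_no_char_in_drop this m hm him
            · have hqb : q ≤ b := by
                by_contra hlt
                push_neg at hlt
                exact hcond ⟨hb, Or.inr hlt⟩
              obtain ⟨hib, hbpre, hbmin⟩ :=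
                PySem.Chars.findFrom_natCast_spec cs ['\\'] i hk hb
              intro hc
              exact hbmin m him (by omega) (pv_prefix_of_sq hm hc)
          have hskip := pv_aloop_skip cs fA i (cs.length - q.toNat + 1) q.toNat
            (by omega) (by omega) hA (by omega) hord
          rw [hskip]
          have hqlt : (q.toNat : Int) < (cs.length : Int) := by exact_mod_cast hqlen
          have hget : PySem.List.pyGet? cs (q.toNat : Int) = some cs[q.toNat] := by
            rw [PySem.List.pyGet?_natCast]
            exact List.getElem?_eq_some_iff.mpr ⟨hqlen, rfl⟩
          have hnb : cs[q.toNat] ≠ '\\' := by rw [hqchar]; decide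
          simp only [pvALoop, if_pos hqlt, hget]
          rw [if_neg hnb, if_pos hqchar]
          omega

-- ===== VERDICT (by name: the statement is the Claim_ definition above) =====
theorem consume_char_literal_end_py_spec : Claim_equal_consume_char_literal_end_py := by
  intro text start _hdom hpre
  unfold Pre_consume_char_literal_end_py at hpre
  unfold Spec_consume_char_literal_end_py
  unfold consume_char_literal_end_py consume_char_literal_end_py_alt
  set cs := text.toList with hcs
  have hmax : max (start + 1) 0 = start + 1 := by omega
  have hcast : ((start + 1).toNat : Int) = start + 1 := by omega
  rw [hmax, ← hcast]
  exact pv_ab_eq cs cs.length (start + 1).toNat _ _ (by omega) (by omega) (by omega)
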